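-- pv_equiv track=rewrite | github.com/jayamurli1954/sanmitra-backend | app/modules/legal_compat/template_drafting.py | _amount_to_words_indian
-- ===== SOURCE A (Python) =====
-- def _amount_to_words_indian(n: int) -> str:
--     if n == 0:
--         return "Zero"
--
--     ones = [
--         "",
--         "One",
--         "Two",
--         "Three",
--         "Four",
--         "Five",
--         "Six",
--         "Seven",
--         "Eight",
--         "Nine",
--     ]
--     teens = [
--         "Ten",
--         "Eleven",
--         "Twelve",
--         "Thirteen",
--         "Fourteen",
--         "Fifteen",
--         "Sixteen",
--         "Seventeen",
--         "Eighteen",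
--         "Nineteen",
--     ]
--     tens = [
--         "",
--         "",
--         "Twenty",
--         "Thirty",
--         "Forty",
--         "Fifty",
--         "Sixty",
--         "Seventy",
--         "Eighty",
--         "Ninety",
--     ]
--
--     def two_digits(x: int) -> str:
--         if x < 10:
--             return ones[x]
--         if 10 <= x < 20:
--             return teens[x - 10]
--         t = x // 10
--         o = x % 10
--         return f"{tens[t]} {ones[o]}".strip()
--
--     def three_digits(x: int) -> str:
--         h = x // 100
--         r = x % 100
--         if h and r:
--             return f"{ones[h]} Hundred {two_digits(r)}"
--         if h:
--             return f"{ones[h]} Hundred"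
--         return two_digits(r)
--
--     crore = n // 10000000
--     n %= 10000000
--     lakh = n // 100000
--     n %= 100000
--     thousand = n // 1000
--     n %= 1000
--     hundred_part = n
--
--     parts: list[str] = []
--     if crore:
--         parts.append(f"{two_digits(crore)} Crore")
--     if lakh:
--         parts.append(f"{two_digits(lakh)} Lakh")
--     if thousand:
--         parts.append(f"{two_digits(thousand)} Thousand")
--     if hundred_part:
--         parts.append(three_digits(hundred_part))
--
--     return " ".join(part.strip() for part in parts if part.strip()).strip()
-- ===== SOURCE B (Python) =====
-- # B: data-driven scale loop (Crore/Lakh/Thousand/Hundred all from one table) replacing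
-- # A's four unrolled group branches and its separate three_digits helper.
-- _ONES = ["", "One", "Two", "Three", "Four", "Five", "Six", "Seven", "Eight", "Nine"]
-- _TEENS = ["Ten", "Eleven", "Twelve", "Thirteen", "Fourteen", "Fifteen", "Sixteen",
--           "Seventeen", "Eighteen", "Nineteen"]
-- _TENS = ["", "", "Twenty", "Thirty", "Forty", "Fifty", "Sixty", "Seventy", "Eighty", "Ninety"]
-- _SCALES = [(10_000_000, " Crore"), (100_000, " Lakh"), (1_000, " Thousand"), (100, " Hundred")]
--
--
-- def _two_digits(x: int) -> str:
--     if x < 10: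
--         return _ONES[x]
--     if x < 20:
--         return _TEENS[x - 10]
--     t, o = divmod(x, 10)
--     return (_TENS[t] + " " + _ONES[o]).strip()
--
--
-- def _amount_to_words_indian(n: int) -> str:
--     if n == 0:
--         return "Zero"
--     parts: list[str] = []
--     for div, label in _SCALES:
--         q, n = divmod(n, div)
--         if q:
--             parts.append(_two_digits(q) + label)
--     if n:
--         parts.append(_two_digits(n))
--     return " ".join(p.strip() for p in parts if p.strip()).strip()
-- ===== Notes on version B (the rewrite author's own statement) =====
-- stated objective: simpler
-- what changed: A's four unrolled scale branches (crore/lakh/thousand plus a separate three_digits helper for the hundreds group) are replaced by one data-driven divmod loop over a scale table [(10000000,' Crore'),(100000,' Lakh'),(1000,' Thousand'),(100,' Hundred')], so the hundreds group is produced by the same loop and three_digits disappears.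
import Mathlib
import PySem

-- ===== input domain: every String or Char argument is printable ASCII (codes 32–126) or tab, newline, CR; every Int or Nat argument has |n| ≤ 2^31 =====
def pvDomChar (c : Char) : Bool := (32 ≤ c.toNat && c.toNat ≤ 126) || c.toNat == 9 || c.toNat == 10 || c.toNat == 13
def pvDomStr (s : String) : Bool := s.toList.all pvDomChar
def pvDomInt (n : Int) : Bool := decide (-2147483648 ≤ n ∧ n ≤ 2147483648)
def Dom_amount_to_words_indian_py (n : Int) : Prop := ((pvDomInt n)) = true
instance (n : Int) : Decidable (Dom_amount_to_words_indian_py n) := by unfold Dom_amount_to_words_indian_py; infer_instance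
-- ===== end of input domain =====

-- B replaces A's four unrolled scale branches and its three_digits helper by one data-driven
-- loop over a scale table (Crore/Lakh/Thousand/Hundred); same return value (objective: simpler).

-- ===== PORT A =====
def pvOnesA : List String :=
  ["", "One", "Two", "Three", "Four", "Five", "Six", "Seven", "Eight", "Nine"]
def pvTeensA : List String :=
  ["Ten", "Eleven", "Twelve", "Thirteen", "Fourteen", "Fifteen", "Sixteen",
   "Seventeen", "Eighteen", "Nineteen"]
def pvTensA : List String :=
  ["", "", "Twenty", "Thirty", "Forty", "Fifty", "Sixty", "Seventy", "Eighty", "Ninety"]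

def pvTwoDigitsA (x : Int) : String :=
  if x < 10 then (PySem.List.pyGet? pvOnesA x).getD ""
  else if 10 ≤ x ∧ x < 20 then (PySem.List.pyGet? pvTeensA (x - 10)).getD ""
  else
    PySem.Str.strip ((PySem.List.pyGet? pvTensA (PySem.Int.floordiv x 10)).getD "" ++ " " ++
      (PySem.List.pyGet? pvOnesA (PySem.Int.mod x 10)).getD "")

def pvThreeDigitsA (x : Int) : String :=
  let h := PySem.Int.floordiv x 100
  let r := PySem.Int.mod x 100
  if h ≠ 0 ∧ r ≠ 0 then (PySem.List.pyGet? pvOnesA h).getD "" ++ " Hundred " ++ pvTwoDigitsA r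
  else if h ≠ 0 then (PySem.List.pyGet? pvOnesA h).getD "" ++ " Hundred"
  else pvTwoDigitsA r

def amount_to_words_indian_py (n : Int) : String :=
  if n = 0 then "Zero"
  else
    let crore := PySem.Int.floordiv n 10000000
    let n1 := PySem.Int.mod n 10000000
    let lakh := PySem.Int.floordiv n1 100000
    let n2 := PySem.Int.mod n1 100000
    let thousand := PySem.Int.floordiv n2 1000
    let hundred_part := PySem.Int.mod n2 1000
    let parts : List String := []
    let parts := if crore ≠ 0 then parts ++ [pvTwoDigitsA crore ++ " Crore"] else parts
    let parts := if lakh ≠ 0 then parts ++ [pvTwoDigitsA lakh ++ " Lakh"] else parts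
    let parts := if thousand ≠ 0 then parts ++ [pvTwoDigitsA thousand ++ " Thousand"] else parts
    let parts := if hundred_part ≠ 0 then parts ++ [pvThreeDigitsA hundred_part] else parts
    PySem.Str.strip (PySem.Str.join " "
      ((parts.filter (fun p => decide (PySem.Str.strip p ≠ ""))).map PySem.Str.strip))

-- ===== PORT B =====
def pvOnesB : List String :=
  ["", "One", "Two", "Three", "Four", "Five", "Six", "Seven", "Eight", "Nine"]
def pvTeensB : List String :=
  ["Ten", "Eleven", "Twelve", "Thirteen", "Fourteen", "Fifteen", "Sixteen",
   "Seventeen", "Eighteen", "Nineteen"]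
def pvTensB : List String :=
  ["", "", "Twenty", "Thirty", "Forty", "Fifty", "Sixty", "Seventy", "Eighty", "Ninety"]
def pvScalesB : List (Int × String) :=
  [(10000000, " Crore"), (100000, " Lakh"), (1000, " Thousand"), (100, " Hundred")]

def pvTwoDigitsB (x : Int) : String :=
  if x < 10 then (PySem.List.pyGet? pvOnesB x).getD ""
  else if x < 20 then (PySem.List.pyGet? pvTeensB (x - 10)).getD ""
  else
    PySem.Str.strip ((PySem.List.pyGet? pvTensB (PySem.Int.floordiv x 10)).getD "" ++ " " ++
      (PySem.List.pyGet? pvOnesB (PySem.Int.mod x 10)).getD "")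

def amount_to_words_indian_py_alt (n : Int) : String :=
  if n = 0 then "Zero"
  else
    let st := pvScalesB.foldl
      (fun (st : Int × List String) dl =>
        let q := PySem.Int.floordiv st.1 dl.1
        let rem := PySem.Int.mod st.1 dl.1
        (rem, if q ≠ 0 then st.2 ++ [pvTwoDigitsB q ++ dl.2] else st.2))
      (n, [])
    let parts := if st.1 ≠ 0 then st.2 ++ [pvTwoDigitsB st.1] else st.2
    PySem.Str.strip (PySem.Str.join " "
      ((parts.filter (fun p => decide (PySem.Str.strip p ≠ ""))).map PySem.Str.strip))

-- ===== PRECONDITION & SPEC =====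
-- Pre_ excludes exactly the inputs on which A raises IndexError: outside this range the crore
-- quotient falls outside the Python index range of the ones/tens tables.
def Pre_amount_to_words_indian_py (n : Int) : Prop := -100000000 ≤ n ∧ n < 1000000000
instance (n : Int) : Decidable (Pre_amount_to_words_indian_py n) := by
  unfold Pre_amount_to_words_indian_py; infer_instance
def pvWitness_amount_to_words_indian_py : Int := 123456789
def Spec_amount_to_words_indian_py (n : Int) (out : String) : Prop :=
  out = amount_to_words_indian_py_alt n
instance (n : Int) (out : String) : Decidable (Spec_amount_to_words_indian_py n out) := by
  unfold Spec_amount_to_words_indian_py; infer_instance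

-- ===== CLAIM (what is proved, stated in full; the proofs are below) =====
def Claim_equal_amount_to_words_indian_py : Prop :=
  ∀ (n : Int), Dom_amount_to_words_indian_py n → Pre_amount_to_words_indian_py n →
    Spec_amount_to_words_indian_py n (amount_to_words_indian_py n)

-- ===== LEMMAS AND PROOFS =====

-- string-level helpers
theorem pvStrEq (a b : String) (h : a.toList = b.toList) : a = b :=
  String.toList_injective h

theorem pvToListAppend (a b : String) : (a ++ b).toList = a.toList ++ b.toList := by
  simp

theorem pvNeEmpty (s : String) (h : s.toList ≠ []) : s ≠ "" := by
  intro he; subst he; exact h rfl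

-- "stripped at both ends": nonempty, and first and last characters are not whitespace
def pvEdgeOk (s : String) : Bool :=
  !s.toList.isEmpty &&
  s.toList.head?.all (fun c => !PySem.Chars.isspace c) &&
  s.toList.getLast?.all (fun c => !PySem.Chars.isspace c)

theorem pvEdgeNeNil (s : String) (h : pvEdgeOk s = true) : s.toList ≠ [] := by
  unfold pvEdgeOk at h
  simp only [Bool.and_eq_true, Bool.not_eq_true'] at h
  intro hn
  rw [hn] at h
  simp at h

theorem pvEdgeNe (s : String) (h : pvEdgeOk s = true) : s ≠ "" :=
  pvNeEmpty s (pvEdgeNeNil s h)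

theorem pvStripSelf (s : String) (h : pvEdgeOk s = true) : PySem.Str.strip s = s := by
  apply pvStrEq
  rw [PySem.Str.toList_strip]
  unfold pvEdgeOk at h
  simp only [Bool.and_eq_true, Bool.not_eq_true'] at h
  obtain ⟨⟨hne, hhead⟩, hlast⟩ := h
  unfold PySem.Chars.strip PySem.Chars.lstrip PySem.Chars.rstrip
  cases hl : s.toList with
  | nil => rw [hl] at hne; simp at hne
  | cons c t =>
    rw [hl] at hhead hlast
    have hc : PySem.Chars.isspace c = false := by simpa using hhead
    rw [List.dropWhile_cons, if_neg (by simp [hc])]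
    cases hrev : (c :: t).reverse with
    | nil => simp at hrev
    | cons d rest =>
      have hd : PySem.Chars.isspace d = false := by
        have : (c :: t).getLast? = some d := by
          rw [← List.head?_reverse, hrev]; rfl
        rw [this] at hlast
        simpa using hlast
      rw [List.dropWhile_cons, if_neg (by simp [hd]), ← hrev, List.reverse_reverse]

theorem pvEdgeGlue (a b : String) (ha : pvEdgeOk a = true) (hb : pvEdgeOk b = true) :
    pvEdgeOk (a ++ " " ++ b) = true := by
  unfold pvEdgeOk at *
  simp only [Bool.and_eq_true, Bool.not_eq_true'] at *
  obtain ⟨⟨hane, hahead⟩, halast⟩ := ha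
  obtain ⟨⟨hbne, hbhead⟩, hblast⟩ := hb
  have htl : (a ++ " " ++ b).toList = a.toList ++ (" " : String).toList ++ b.toList := by
    rw [pvToListAppend, pvToListAppend]
  rw [htl]
  cases hla : a.toList with
  | nil => rw [hla] at hane; simp at hane
  | cons c t =>
    cases hlb : b.toList with
    | nil => rw [hlb] at hbne; simp at hbne
    | cons d u =>
      rw [hla] at hahead
      refine ⟨⟨by simp, ?_⟩, ?_⟩
      · simp only [List.cons_append, List.head?_cons] at *
        exact hahead
      · rw [List.getLast?_append]
        rw [hlb] at hblast
        cases hgl : (d :: u).getLast? with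
        | none => simp at hgl
        | some e =>
          rw [hgl] at hblast
          simp [Option.or, hblast]

-- the per-digit facts, decided once over Fin 100
theorem pvEdgeTwoBFin :
    ∀ k : Fin 100, k.val = 0 ∨ pvEdgeOk (pvTwoDigitsB ((k.val : Nat) : Int)) = true := by decide

theorem pvEdgeTwoB (x : Int) (h1 : 1 ≤ x) (h2 : x < 100) :
    pvEdgeOk (pvTwoDigitsB x) = true := by
  have hx : ((x.toNat : Nat) : Int) = x := by omega
  rcases pvEdgeTwoBFin ⟨x.toNat, by omega⟩ with h | h
  · simp only [] at h; omega
  · have h' : pvEdgeOk (pvTwoDigitsB ((x.toNat : Nat) : Int)) = true := h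
    rwa [hx] at h'

theorem pvOnesTwoB (h : Int) (h1 : 1 ≤ h) (h2 : h < 10) :
    (PySem.List.pyGet? pvOnesA h).getD "" = pvTwoDigitsB h := by
  interval_cases h <;> decide

theorem pvTwoAB (x : Int) : pvTwoDigitsA x = pvTwoDigitsB x := by
  unfold pvTwoDigitsA pvTwoDigitsB pvOnesA pvOnesB pvTeensA pvTeensB pvTensA pvTensB
  split_ifs with hc1 hc2 hc3 <;> first | rfl | omega

-- the shared shape of both ports' final line
def pvJoinParts (l : List String) : String :=
  PySem.Str.join " " ((l.filter (fun p => decide (PySem.Str.strip p ≠ ""))).map PySem.Str.strip)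

def pvHp (n : Int) : Int :=
  PySem.Int.mod (PySem.Int.mod (PySem.Int.mod n 10000000) 100000) 1000

def pvPrefix (n : Int) : List String :=
  (if PySem.Int.floordiv n 10000000 ≠ 0 then
     [pvTwoDigitsB (PySem.Int.floordiv n 10000000) ++ " Crore"] else []) ++
  (if PySem.Int.floordiv (PySem.Int.mod n 10000000) 100000 ≠ 0 then
     [pvTwoDigitsB (PySem.Int.floordiv (PySem.Int.mod n 10000000) 100000) ++ " Lakh"] else []) ++
  (if PySem.Int.floordiv (PySem.Int.mod (PySem.Int.mod n 10000000) 100000) 1000 ≠ 0 then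
     [pvTwoDigitsB (PySem.Int.floordiv (PySem.Int.mod (PySem.Int.mod n 10000000) 100000) 1000) ++
       " Thousand"] else [])

def pvTailA (m : Int) : List String :=
  if m ≠ 0 then [pvThreeDigitsA m] else []

def pvTailB (m : Int) : List String :=
  (if PySem.Int.floordiv m 100 ≠ 0 then
     [pvTwoDigitsB (PySem.Int.floordiv m 100) ++ " Hundred"] else []) ++
  (if PySem.Int.mod m 100 ≠ 0 then [pvTwoDigitsB (PySem.Int.mod m 100)] else [])

theorem pvLA (n : Int) (hn : ¬ n = 0) :
    amount_to_words_indian_py n =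
      PySem.Str.strip (pvJoinParts (pvPrefix n ++ pvTailA (pvHp n))) := by
  simp only [amount_to_words_indian_py, if_neg hn, pvJoinParts, pvPrefix, pvTailA, pvHp, pvTwoAB]
  split_ifs <;> simp

theorem pvLB (n : Int) (hn : ¬ n = 0) :
    amount_to_words_indian_py_alt n =
      PySem.Str.strip (pvJoinParts (pvPrefix n ++ pvTailB (pvHp n))) := by
  simp only [amount_to_words_indian_py_alt, if_neg hn, pvScalesB, List.foldl,
    pvJoinParts, pvPrefix, pvTailB, pvHp]
  split_ifs <;> simp

theorem pvJoinConsNe (sp m : List Char) (L : List (List Char)) (h : L ≠ []) :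
    PySem.Chars.join sp (m :: L) = m ++ sp ++ PySem.Chars.join sp L := by
  cases L with
  | nil => exact absurd rfl h
  | cons x xs => exact PySem.Chars.join_cons_cons sp m x xs

theorem pvJoinCharsPair (sp : List Char) (M : List (List Char)) (p q : List Char) :
    PySem.Chars.join sp (M ++ [p ++ sp ++ q]) = PySem.Chars.join sp (M ++ [p, q]) := by
  induction M with
  | nil =>
    rw [List.nil_append, List.nil_append, PySem.Chars.join_singleton,
      PySem.Chars.join_cons_cons, PySem.Chars.join_singleton]
  | cons m M ih =>
    rw [List.cons_append, List.cons_append,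
      pvJoinConsNe sp m _ (by simp), pvJoinConsNe sp m _ (by simp), ih]

theorem pvJoinStrPair (M : List String) (a b : String) :
    PySem.Str.join " " (M ++ [a ++ " " ++ b]) = PySem.Str.join " " (M ++ [a, b]) := by
  unfold PySem.Str.join
  apply congrArg
  rw [List.map_append, List.map_append]
  have htl : (a ++ " " ++ b).toList = a.toList ++ (" " : String).toList ++ b.toList := by
    rw [pvToListAppend, pvToListAppend]
  simp only [List.map_cons, List.map_nil, htl]
  exact pvJoinCharsPair (" " : String).toList (M.map String.toList) a.toList b.toList

theorem pvJoinPair (C : List String) (a b : String)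
    (ea : pvEdgeOk a = true) (eb : pvEdgeOk b = true) :
    pvJoinParts (C ++ [a ++ " " ++ b]) = pvJoinParts (C ++ [a, b]) := by
  have eab : pvEdgeOk (a ++ " " ++ b) = true := pvEdgeGlue a b ea eb
  have sa := pvStripSelf a ea
  have sb := pvStripSelf b eb
  have sab := pvStripSelf _ eab
  have na := pvEdgeNe a ea
  have nb := pvEdgeNe b eb
  have nab := pvEdgeNe _ eab
  unfold pvJoinParts
  rw [List.filter_append, List.filter_append, List.map_append, List.map_append]
  have h1 : List.filter (fun p => decide (PySem.Str.strip p ≠ "")) [a ++ " " ++ b]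
      = [a ++ " " ++ b] := by simp [sab, nab]
  have h2 : List.filter (fun p => decide (PySem.Str.strip p ≠ "")) [a, b] = [a, b] := by
    simp [sa, sb, na, nb]
  rw [h1, h2]
  have m1 : List.map PySem.Str.strip [a ++ " " ++ b] = [a ++ " " ++ b] := by simp [sab]
  have m2 : List.map PySem.Str.strip [a, b] = [a, b] := by simp [sa, sb]
  rw [m1, m2]
  exact pvJoinStrPair _ a b

theorem pvHundredAssoc (x y : String) :
    x ++ " Hundred " ++ y = (x ++ " Hundred") ++ " " ++ y := by
  apply pvStrEq
  simp only [pvToListAppend]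
  rw [List.append_assoc, List.append_assoc, List.append_assoc]
  congr 1

theorem pvCore (C : List String) (m : Int) (h0 : 0 ≤ m) (h1 : m < 1000) :
    pvJoinParts (C ++ pvTailA m) = pvJoinParts (C ++ pvTailB m) := by
  have hfd : PySem.Int.floordiv m 100 = m / 100 :=
    PySem.Int.floordiv_eq_ediv_of_pos (by norm_num)
  have hmod : PySem.Int.mod m 100 = m % 100 :=
    PySem.Int.mod_eq_emod_of_pos (by norm_num)
  by_cases hh : m / 100 = 0
  · have hrm : m % 100 = m := by omega
    simp [pvTailA, pvTailB, pvThreeDigitsA, hh, hrm, pvTwoAB]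
  · have hm : ¬ m = 0 := by omega
    have hOT := pvOnesTwoB (m / 100) (by omega) (by omega)
    by_cases hr : m % 100 = 0
    · simp [pvTailA, pvTailB, pvThreeDigitsA, hh, hr, hm, hOT]
    · have e1 : pvEdgeOk (pvTwoDigitsB (m / 100)) = true := pvEdgeTwoB _ (by omega) (by omega)
      have e2 : pvEdgeOk (pvTwoDigitsB (m % 100)) = true := pvEdgeTwoB _ (by omega) (by omega)
      have eH : pvEdgeOk ("Hundred" : String) = true := by decide
      have hHs : (pvTwoDigitsB (m / 100) ++ " Hundred")
          = pvTwoDigitsB (m / 100) ++ " " ++ "Hundred" := by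
        apply pvStrEq
        simp only [pvToListAppend]
        rw [List.append_assoc]
        congr 1
      have ea : pvEdgeOk (pvTwoDigitsB (m / 100) ++ " Hundred") = true := by
        rw [hHs]; exact pvEdgeGlue _ _ e1 eH
      simp only [pvTailA, pvTailB, pvThreeDigitsA, hfd, hmod, if_pos hm,
        if_pos (show m / 100 ≠ 0 from hh), if_pos (show m % 100 ≠ 0 from hr),
        if_pos (show m / 100 ≠ 0 ∧ m % 100 ≠ 0 from ⟨hh, hr⟩), hOT, pvTwoAB]
      rw [pvHundredAssoc]
      have := pvJoinPair C (pvTwoDigitsB (m / 100) ++ " Hundred") (pvTwoDigitsB (m % 100)) ea e2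
      simpa using this

-- ===== VERDICT (by name: the statement is the Claim_ definition above) =====
theorem amount_to_words_indian_py_spec : Claim_equal_amount_to_words_indian_py := by
  intro n hdom hpre
  unfold Spec_amount_to_words_indian_py
  by_cases hn : n = 0
  · subst hn; rfl
  · rw [pvLA n hn, pvLB n hn]
    apply congrArg
    have hb2 : pvHp n = ((n % 10000000) % 100000) % 1000 := by
      unfold pvHp
      rw [PySem.Int.mod_eq_emod_of_pos (show (0:Int) < 10000000 by norm_num),
        PySem.Int.mod_eq_emod_of_pos (show (0:Int) < 100000 by norm_num),
        PySem.Int.mod_eq_emod_of_pos (show (0:Int) < 1000 by norm_num)]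
    have h0 : 0 ≤ pvHp n := by rw [hb2]; omega
    have h1 : pvHp n < 1000 := by rw [hb2]; omega
    exact pvCore (pvPrefix n) (pvHp n) h0 h1
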